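-- pv_equiv track=rewrite | github.com/teoman1234/LivePerformance-Analytics-Portal-demo | app/main.py | get_archetype
-- ===== SOURCE A (Python) =====
-- def get_archetype(username: str) -> str:
--     """Determine a deterministic archetype based on username"""
--     hash_val = sum(ord(c) for c in username)
--     mod = hash_val % 100
--
--     if mod < 15: return "SNIPER"       # 15%
--     if mod < 40: return "GRINDER"      # 25%
--     if mod < 55: return "RISING_STAR"  # 15%
--     if mod < 60: return "UNICORN"      # 5%
--     return "STANDARD"                  # 40%
-- ===== SOURCE B (Python) =====
-- _BOUNDS = [15, 40, 55, 60, 100]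
-- _NAMES = ["SNIPER", "GRINDER", "RISING_STAR", "UNICORN", "STANDARD"]
--
-- def get_archetype(username: str) -> str:
--     # single pass keeping only the running hash modulo 100
--     mod = 0
--     for c in username:
--         mod = (mod + ord(c)) % 100
--     # binary search for the first bucket bound strictly above mod
--     lo, hi = 0, len(_BOUNDS) - 1
--     while lo < hi:
--         mid = (lo + hi) // 2
--         if mod < _BOUNDS[mid]:
--             hi = mid
--         else:
--             lo = mid + 1
--     return _NAMES[lo]
-- ===== Notes on version B (the rewrite author's own statement) =====
-- stated objective: alternative
-- what changed: B keeps only a running hash modulo 100 while scanning the string (instead of a full sum followed by %) and then binary-searches a sorted bound table for the bucket instead of walking A's comparison cascade.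
import Mathlib
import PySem

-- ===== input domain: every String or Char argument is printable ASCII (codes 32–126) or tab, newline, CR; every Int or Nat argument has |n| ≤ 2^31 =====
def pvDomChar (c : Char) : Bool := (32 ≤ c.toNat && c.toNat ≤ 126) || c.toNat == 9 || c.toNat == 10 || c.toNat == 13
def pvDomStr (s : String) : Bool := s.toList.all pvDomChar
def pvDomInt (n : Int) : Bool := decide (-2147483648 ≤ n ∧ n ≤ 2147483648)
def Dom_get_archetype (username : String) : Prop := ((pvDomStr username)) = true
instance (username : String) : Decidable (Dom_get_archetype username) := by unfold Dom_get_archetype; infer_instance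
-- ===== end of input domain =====

-- B keeps a running hash modulo 100 during the scan and binary-searches a sorted bound table for the bucket (alternative decomposition, same cost).

-- ===== PORT A =====
def get_archetype (username : String) : String :=
  let hash_val : Int := username.toList.foldl (fun acc c => acc + (c.toNat : Int)) 0
  let m : Int := PySem.Int.mod hash_val 100
  if m < 15 then "SNIPER"
  else if m < 40 then "GRINDER"
  else if m < 55 then "RISING_STAR"
  else if m < 60 then "UNICORN"
  else "STANDARD"

-- ===== PORT B =====
def pvBounds : List Int := [15, 40, 55, 60, 100]
def pvNames : List String := ["SNIPER", "GRINDER", "RISING_STAR", "UNICORN", "STANDARD"]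

-- Source B's while-loop; fuel = hi - lo bounds the iterations (the loop halves [lo,hi) each step)
def pvBsearch : Nat → Int → Nat → Nat → Nat
  | 0, _, lo, _ => lo
  | fuel + 1, m, lo, hi =>
    if lo < hi then
      let mid := (lo + hi) / 2
      if m < (PySem.List.pyGet? pvBounds (mid : Int)).getD 0 then pvBsearch fuel m lo mid
      else pvBsearch fuel m (mid + 1) hi
    else lo

def get_archetype_alt (username : String) : String :=
  let m : Int := username.toList.foldl (fun acc c => PySem.Int.mod (acc + (c.toNat : Int)) 100) 0
  (PySem.List.pyGet? pvNames ((pvBsearch (pvBounds.length - 1) m 0 (pvBounds.length - 1)) : Int)).getD ""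

-- ===== PRECONDITION & SPEC =====
def Spec_get_archetype (username : String) (out : String) : Prop := out = get_archetype_alt username
instance (username : String) (out : String) : Decidable (Spec_get_archetype username out) := by unfold Spec_get_archetype; infer_instance

-- ===== CLAIM (what is proved, stated in full; the proofs are below) =====
def Claim_equal_get_archetype : Prop := ∀ (username : String), Dom_get_archetype username → Spec_get_archetype username (get_archetype username)

-- ===== LEMMAS AND PROOFS =====

-- the running-mod fold equals the plain sum taken mod 100 at the end
theorem pv_fold_mod (l : List Char) (a : Int) :
    l.foldl (fun acc c => PySem.Int.mod (acc + (c.toNat : Int)) 100) (PySem.Int.mod a 100)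
      = PySem.Int.mod (l.foldl (fun acc c => acc + (c.toNat : Int)) a) 100 := by
  induction l generalizing a with
  | nil => rfl
  | cons c t ih =>
    simp only [List.foldl_cons]
    have hmm : PySem.Int.mod (PySem.Int.mod a 100 + (c.toNat : Int)) 100
        = PySem.Int.mod (a + (c.toNat : Int)) 100 := by
      rw [PySem.Int.mod_eq_emod_of_pos (by norm_num : (0:Int) < 100),
          PySem.Int.mod_eq_emod_of_pos (by norm_num : (0:Int) < 100),
          PySem.Int.mod_eq_emod_of_pos (by norm_num : (0:Int) < 100), Int.emod_add_emod]
    rw [hmm]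
    exact ih _

-- for every residue 0 ≤ m < 100, B's binary search + name table yields A's cascade value
theorem pv_search_cascade : ∀ (n : Fin 100),
    (PySem.List.pyGet? pvNames ((pvBsearch (pvBounds.length - 1) (n : Int) 0 (pvBounds.length - 1)) : Int)).getD ""
      = (if (n : Int) < 15 then "SNIPER"
         else if (n : Int) < 40 then "GRINDER"
         else if (n : Int) < 55 then "RISING_STAR"
         else if (n : Int) < 60 then "UNICORN"
         else "STANDARD") := by
  decide

-- ===== VERDICT (by name: the statement is the Claim_ definition above) =====
theorem get_archetype_spec : Claim_equal_get_archetype := by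
  intro username _
  unfold Spec_get_archetype get_archetype get_archetype_alt
  have hfold := pv_fold_mod username.toList 0
  simp only [show PySem.Int.mod 0 100 = 0 from rfl] at hfold
  rw [hfold]
  set s : Int := username.toList.foldl (fun acc c => acc + (c.toNat : Int)) 0 with hs
  have h0 : 0 ≤ PySem.Int.mod s 100 := PySem.Int.mod_nonneg s (by norm_num)
  have h1 : PySem.Int.mod s 100 < 100 := PySem.Int.mod_lt s (by norm_num)
  have hcast : PySem.Int.mod s 100 = (((PySem.Int.mod s 100).toNat : Int)) := by omega
  have hfin : (PySem.Int.mod s 100).toNat < 100 := by omega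
  have key := pv_search_cascade ⟨(PySem.Int.mod s 100).toNat, hfin⟩
  show (if PySem.Int.mod s 100 < 15 then "SNIPER"
        else if PySem.Int.mod s 100 < 40 then "GRINDER"
        else if PySem.Int.mod s 100 < 55 then "RISING_STAR"
        else if PySem.Int.mod s 100 < 60 then "UNICORN"
        else "STANDARD")
      = (PySem.List.pyGet? pvNames
          ((pvBsearch (pvBounds.length - 1) (PySem.Int.mod s 100) 0 (pvBounds.length - 1)) : Int)).getD ""
  rw [hcast]
  exact key.symm
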